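-- pv_equiv track=rewrite | github.com/tdansa7/stock_predction_TFT | deep_ai_ori_all_46lstm_test1o_hour1_5_30_crust225_y.py | count_negative_streak
-- ===== SOURCE A (Python) =====
-- def count_negative_streak(column):
--     streaks = []  # 各セルごとの連続マイナスのカウント
--     count = 0     # 連続マイナスのカウント
--
--     for val in column:
--         if val < 0:
--             count += 1
--         else:
--             count = 0
--         streaks.append(count)
--
--     return streaks
-- ===== SOURCE B (Python) =====
-- def count_negative_streak(column):
--     out = []
--     i = 0
--     n = len(column)
--     while i < n:
--         neg = column[i] < 0
--         j = i
--         while j < n and (column[j] < 0) == neg: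
--             j += 1
--         L = j - i
--         out.extend(range(1, L + 1) if neg else [0] * L)
--         i = j
--     return out
-- ===== Notes on version B (the rewrite author's own statement) =====
-- stated objective: alternative
-- what changed: B partitions the column into maximal same-sign runs and emits a whole run at once (range(1,L+1) for a negative run, L zeros otherwise), instead of A's per-element running counter.
import Mathlib
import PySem

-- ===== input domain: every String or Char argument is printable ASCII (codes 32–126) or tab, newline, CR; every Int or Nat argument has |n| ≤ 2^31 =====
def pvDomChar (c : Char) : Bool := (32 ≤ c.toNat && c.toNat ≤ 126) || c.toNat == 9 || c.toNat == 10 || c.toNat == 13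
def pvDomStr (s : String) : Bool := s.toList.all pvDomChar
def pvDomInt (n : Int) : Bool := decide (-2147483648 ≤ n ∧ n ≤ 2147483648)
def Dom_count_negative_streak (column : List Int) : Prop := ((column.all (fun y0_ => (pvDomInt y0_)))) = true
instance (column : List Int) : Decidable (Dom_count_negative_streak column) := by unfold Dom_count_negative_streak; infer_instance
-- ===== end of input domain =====

-- B replaces A's per-element running counter with a run-based decomposition (maximal
-- same-sign runs, each emitted wholesale): a structurally different pass of the same cost.


-- ===== PORT A =====
-- A: per-element running counter, reset on non-negative values (foldl over the column,
-- appending the current count for each cell — a literal transliteration of A's loop).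
def count_negative_streak (column : List Int) : List Int :=
  (column.foldl (fun (st : Int × List Int) val =>
      let count : Int := if val < 0 then st.1 + 1 else 0
      (count, st.2 ++ [count]))
    (0, [])).2

-- ===== PORT B =====
-- B: partition the column into maximal same-sign runs; a negative run of length L
-- contributes 1..L, a non-negative run contributes L zeros (transcription of Source B's
-- run-scanning while loops as takeWhile/dropWhile on the sign of the run's head).
def count_negative_streak_alt : List Int → List Int
  | [] => []
  | x :: xs =>
    let neg := decide (x < 0)
    let p : Int → Bool := fun v => decide (v < 0) == neg
    let run := List.takeWhile p (x :: xs)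
    let rest := List.dropWhile p (x :: xs)
    (if neg then PySem.List.pyRange 1 ((run.length : Int) + 1)
     else List.replicate run.length 0) ++ count_negative_streak_alt rest
  termination_by l => l.length
  decreasing_by
    simp only [List.dropWhile_cons, beq_self_eq_true, if_pos]
    exact Nat.lt_succ_of_le (List.length_dropWhile_le _ _)

-- ===== PRECONDITION & SPEC =====
def Spec_count_negative_streak (column : List Int) (out : List Int) : Prop := out = count_negative_streak_alt column
instance (column : List Int) (out : List Int) : Decidable (Spec_count_negative_streak column out) := by unfold Spec_count_negative_streak; infer_instance

-- ===== CLAIM (what is proved, stated in full; the proofs are below) =====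
def Claim_equal_count_negative_streak : Prop := ∀ (column : List Int), Dom_count_negative_streak column → Spec_count_negative_streak column (count_negative_streak column)

-- ===== LEMMAS AND PROOFS =====

-- A's loop, written as structural recursion on the remaining column with the running
-- counter as parameter (proof-side reformulation of the foldl in the port of A).
def pvGoA (c : Int) : List Int → List Int
  | [] => []
  | v :: t =>
    let c' : Int := if v < 0 then c + 1 else 0
    c' :: pvGoA c' t

theorem pvFold (l : List Int) : ∀ (c : Int) (acc : List Int),
    (l.foldl (fun (st : Int × List Int) val =>
        let count : Int := if val < 0 then st.1 + 1 else 0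
        (count, st.2 ++ [count])) (c, acc)).2 = acc ++ pvGoA c l := by
  induction l with
  | nil => simp [pvGoA]
  | cons v t ih => intro c acc; simp [pvGoA, ih]

-- A's counter over a run of negatives produces c+1, …, c+L and leaves the counter at c+L.
theorem pvNegRun (run : List Int) : ∀ (c : Int) (rest : List Int), (∀ v ∈ run, v < 0) →
    pvGoA c (run ++ rest) =
      PySem.List.pyRange (c + 1) (c + run.length + 1) ++ pvGoA (c + run.length) rest := by
  induction run with
  | nil =>
    intro c rest _
    simp [PySem.List.pyRange]
  | cons v t ih =>
    intro c rest h
    have hv : v < 0 := h v (by simp)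
    have hlt : c + 1 < c + (t.length + 1 : Nat) + 1 := by push_cast; omega
    rw [show ((v :: t).length : Int) = ((t.length + 1 : Nat) : Int) from by simp,
      PySem.List.pyRange_one_cons hlt, List.cons_append]
    simp only [pvGoA, if_pos hv]
    rw [ih (c + 1) rest (fun w hw => h w (by simp [hw]))]
    have h1 : c + 1 + (t.length : Int) + 1 = c + ((t.length + 1 : Nat) : Int) + 1 := by push_cast; ring
    have h2 : c + 1 + (t.length : Int) = c + ((t.length + 1 : Nat) : Int) := by push_cast; ring
    rw [h1, h2, List.cons_append]

-- A's counter over a run of non-negatives, started at 0, produces zeros and stays at 0.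
theorem pvNonnegRun (run : List Int) : ∀ (rest : List Int), (∀ v ∈ run, ¬ v < 0) →
    pvGoA 0 (run ++ rest) = List.replicate run.length 0 ++ pvGoA 0 rest := by
  induction run with
  | nil => intro rest _; simp
  | cons v t ih =>
    intro rest h
    simp only [List.cons_append, pvGoA, if_neg (h v (by simp)),
      ih rest (fun w hw => h w (by simp [hw])), List.length_cons, List.replicate_succ]

-- The counter's value is irrelevant when the next element (if any) is non-negative.
theorem pvReset (c c' : Int) (rest : List Int)
    (h : ∀ v t, rest = v :: t → ¬ v < 0) : pvGoA c rest = pvGoA c' rest := by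
  cases rest with
  | nil => rfl
  | cons v t => simp [pvGoA, if_neg (h v t rfl)]

theorem pvMainAux : ∀ (n : Nat) (l : List Int), l.length ≤ n →
    pvGoA 0 l = count_negative_streak_alt l := by
  intro n
  induction n with
  | zero =>
    intro l hl
    have : l = [] := by cases l <;> simp_all
    subst this
    rw [count_negative_streak_alt]
    rfl
  | succ n ih =>
    intro l hl
    cases l with
    | nil => rw [count_negative_streak_alt]; rfl
    | cons x xs =>
      rw [count_negative_streak_alt]
      set p : Int → Bool := fun v => decide (v < 0) == decide (x < 0) with hp
      have hpx : p x = true := by simp [hp]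
      have hsplit : List.takeWhile p (x :: xs) ++ List.dropWhile p (x :: xs) = x :: xs :=
        List.takeWhile_append_dropWhile
      have hlen : (List.dropWhile p (x :: xs)).length ≤ n := by
        have := List.length_dropWhile_le p xs
        rw [List.dropWhile_cons, if_pos hpx]
        simp at hl
        omega
      have ihrest := ih _ hlen
      by_cases hx : x < 0
      · have hrun : ∀ v ∈ List.takeWhile p (x :: xs), v < 0 := by
          intro v hv
          have := List.mem_takeWhile_imp hv
          simp [hp, hx] at this
          exact this
        have hrest : ∀ v t, List.dropWhile p (x :: xs) = v :: t → ¬ v < 0 := by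
          intro v t heq
          have h2 := List.head?_dropWhile_not p (x :: xs)
          rw [heq] at h2
          simp [hp, hx] at h2
          omega
        rw [← hsplit, pvNegRun _ 0 _ hrun, pvReset _ 0 _ hrest, ihrest]
        simp [hx, hsplit]
      · have hrun : ∀ v ∈ List.takeWhile p (x :: xs), ¬ v < 0 := by
          intro v hv
          have := List.mem_takeWhile_imp hv
          simp [hp, hx] at this
          omega
        rw [← hsplit, pvNonnegRun _ _ hrun, ihrest]
        simp [hx, hsplit]

theorem pvMain (l : List Int) : pvGoA 0 l = count_negative_streak_alt l :=
  pvMainAux l.length l (le_refl _)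

-- ===== VERDICT (by name: the statement is the Claim_ definition above) =====
theorem count_negative_streak_spec : Claim_equal_count_negative_streak := by
  intro column _
  unfold Spec_count_negative_streak count_negative_streak
  rw [pvFold, pvMain]
  rfl
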